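-- pv_equiv track=rewrite | github.com/raynardj/langhuan | langhuan/loaders/pytorch.py | build_word_map
-- ===== SOURCE A (Python) =====
-- from typing import Dict, Union, List, Tuple, Any
--
-- def build_word_map(
--     word_ids: List[int]
--     ) -> List[bool]:
--     """
--     build a is_word_map
--         it will set True for the 1st token of a word
--     """
--     word_map = []
--     last = None
--     for i in word_ids:
--         if i is None:
--             word_map.append(False)
--         elif i != last:
--             word_map.append(True)
--         else:
--             word_map.append(False)
--         last = i
--     return word_map
-- ===== SOURCE B (Python) =====
-- def build_word_map(word_ids):
--     """
--     build a is_word_map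
--         it will set True for the 1st token of a word
--     """
--     # Group consecutive equal ids into runs; emit each run in one step:
--     # a None-run becomes all False, any other run becomes True then False*(L-1).
--     word_map = []
--     n = len(word_ids)
--     k = 0
--     while k < n:
--         key = word_ids[k]
--         j = k + 1
--         while j < n and word_ids[j] == key:
--             j += 1
--         length = j - k
--         if key is None:
--             word_map.extend([False] * length)
--         else:
--             word_map.append(True)
--             word_map.extend([False] * (length - 1))
--         k = j
--     return word_map
-- ===== Notes on version B (the rewrite author's own statement) =====
-- stated objective: alternative
-- what changed: B run-length encodes the id sequence into consecutive-equal runs and then expands each run (None-run -> all False, other run -> True followed by Falses), instead of A's element-by-element comparison against a trailing `last` variable.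
import Mathlib
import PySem

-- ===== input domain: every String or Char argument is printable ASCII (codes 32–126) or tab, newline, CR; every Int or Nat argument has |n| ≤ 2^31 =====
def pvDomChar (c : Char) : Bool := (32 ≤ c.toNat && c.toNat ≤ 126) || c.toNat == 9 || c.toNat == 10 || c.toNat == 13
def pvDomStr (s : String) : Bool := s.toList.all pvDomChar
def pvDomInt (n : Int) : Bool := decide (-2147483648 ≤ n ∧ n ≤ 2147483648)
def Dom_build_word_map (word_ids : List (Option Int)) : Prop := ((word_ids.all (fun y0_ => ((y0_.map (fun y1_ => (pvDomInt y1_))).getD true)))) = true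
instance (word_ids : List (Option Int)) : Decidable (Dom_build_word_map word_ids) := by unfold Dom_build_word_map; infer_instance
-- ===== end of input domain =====

-- B groups consecutive equal ids into runs and expands each run at once, instead of A's
-- element-by-element comparison with a trailing `last` variable (objective: alternative).

-- ===== PORT A =====
-- A's loop: state is the `last` variable; each element appends one Bool and updates `last`.
def buildA (last : Option Int) (xs : List (Option Int)) : List Bool :=
  match xs with
  | [] => []
  | x :: rest =>
    (match x with
     | none => false                 -- `if i is None: append(False)`
     | some _ => decide (x ≠ last))  -- `elif i != last: append(True) else: append(False)`
    :: buildA x rest                 -- `last = i`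

def build_word_map (word_ids : List (Option Int)) : List Bool :=
  buildA none word_ids

-- ===== PORT B =====
-- B's outer while-loop: take the run of elements equal to the head (inner scan =
-- takeWhile/dropWhile), emit the whole run, continue after it.
def build_word_map_alt (word_ids : List (Option Int)) : List Bool :=
  match word_ids with
  | [] => []
  | key :: rest =>
    ((match key with
      | none => false    -- None-run: all False
      | some _ => true)  -- other run: True then False*(L-1)
      :: List.replicate (rest.takeWhile (· == key)).length false)
    ++ build_word_map_alt (rest.dropWhile (· == key))
termination_by word_ids.length
decreasing_by
  simpa using Nat.lt_succ_of_le (List.length_dropWhile_le (· == key) rest)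

-- ===== PRECONDITION & SPEC =====
def Spec_build_word_map (word_ids : List (Option Int)) (out : List Bool) : Prop := out = build_word_map_alt word_ids
instance (word_ids : List (Option Int)) (out : List Bool) : Decidable (Spec_build_word_map word_ids out) := by unfold Spec_build_word_map; infer_instance

-- ===== CLAIM (what is proved, stated in full; the proofs are below) =====
def Claim_equal_build_word_map : Prop := ∀ (word_ids : List (Option Int)), Dom_build_word_map word_ids → Spec_build_word_map word_ids (build_word_map word_ids)

-- ===== LEMMAS AND PROOFS =====

-- The head of `dropWhile (· == x)` is never `x`.
theorem head_dropWhile_ne (t : List (Option Int)) (x : Option Int) :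
    (t.dropWhile (· == x)).head? ≠ some x := by
  induction t with
  | nil => simp
  | cons y ys ih =>
    by_cases h : y = x
    · simpa [List.dropWhile_cons, h] using ih
    · simp [h]

-- Unfolding of B's port on a nonempty list.
theorem alt_cons (x : Option Int) (t : List (Option Int)) :
    build_word_map_alt (x :: t) =
      (((match x with | none => false | some _ => true) : Bool)
        :: List.replicate (t.takeWhile (· == x)).length false)
      ++ build_word_map_alt (t.dropWhile (· == x)) := by
  rw [build_word_map_alt.eq_def]

-- While the next elements equal the current `last`, A emits `false` and `last` is unchanged.
theorem buildA_run (xs : List (Option Int)) (i : Option Int) :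
    buildA i xs =
      List.replicate (xs.takeWhile (· == i)).length false
        ++ buildA i (xs.dropWhile (· == i)) := by
  induction xs with
  | nil => simp [buildA]
  | cons h t ih =>
    by_cases hh : h = i
    · subst hh
      have hstep : buildA h (h :: t) = false :: buildA h t := by
        cases h <;> simp [buildA]
      rw [hstep, ih]
      simp [List.replicate_succ]
    · simp [hh]

-- After a run boundary (head differs from `last`), A and B agree.
theorem buildA_eq_alt (n : Nat) :
    ∀ (xs : List (Option Int)) (i : Option Int), xs.length ≤ n →
      xs.head? ≠ some i → buildA i xs = build_word_map_alt xs := by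
  induction n with
  | zero =>
    intro xs i hn _
    have : xs = [] := List.eq_nil_of_length_eq_zero (Nat.le_zero.mp hn)
    subst this; simp [buildA, build_word_map_alt]
  | succ n ih =>
    intro xs i hn hne
    match xs with
    | [] => simp [buildA, build_word_map_alt]
    | x :: t =>
      have hxi : x ≠ i := by simpa using hne
      have hlen : (t.dropWhile (· == x)).length ≤ n := by
        have h1 := List.length_dropWhile_le (· == x) t
        have h2 : t.length + 1 ≤ n + 1 := by simpa using hn
        omega
      have hb : buildA i (x :: t) =
          ((match x with | none => false | some _ => true) : Bool) :: buildA x t := by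
        cases x <;> simp [buildA, hxi]
      rw [hb, buildA_run t x, ih _ x hlen (head_dropWhile_ne t x), alt_cons]
      cases x <;> simp

-- ===== VERDICT (by name: the statement is the Claim_ definition above) =====
theorem build_word_map_spec : Claim_equal_build_word_map := by
  intro xs _
  unfold Spec_build_word_map build_word_map
  match xs with
  | [] => simp [buildA, build_word_map_alt]
  | x :: t =>
    cases x with
    | none =>
      have := buildA_run (none :: t) none
      rw [this, buildA_eq_alt ((none :: t).dropWhile (· == (none : Option Int))).length _ none
            (Nat.le_refl _) (head_dropWhile_ne (none :: t) none), alt_cons]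
      simp [List.replicate_succ]
    | some v =>
      have hb : buildA none (some v :: t) = true :: buildA (some v) t := by
        simp [buildA]
      rw [hb, buildA_run t (some v),
          buildA_eq_alt (t.dropWhile (· == some v)).length _ (some v) (Nat.le_refl _)
            (head_dropWhile_ne t (some v)), alt_cons]
      simp
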